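-- pv_equiv track=rewrite | github.com/MinxuanDeng/CS5421_project | assertionCompiler/table_detector.py | removeRedundantNewLine
-- ===== SOURCE A (Python) =====
-- def removeRedundantNewLine(text):
--     output = ''
--     for char in text:
--         if char == '\n':
--             if len(output) > 0 and output[-1] == '\n':
--                 continue
--             else:
--                 output += '\n'
--         else:
--             output += char
--     return output
-- ===== SOURCE B (Python) =====
-- def removeRedundantNewLine(text):
--     # keep first char always; keep each later char unless it and its predecessor are both '\n'
--     return text[:1] + ''.join(c for p, c in zip(text, text[1:]) if c != '\n' or p != '\n')
-- ===== Notes on version B (the rewrite author's own statement) =====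
-- stated objective: idiomatic
-- what changed: Replaces the accumulator loop that inspects the output buffer's last character with a stateless pairwise filter: zip the string with itself shifted by one and keep a character unless it and its predecessor are both newlines.
import Mathlib
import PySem

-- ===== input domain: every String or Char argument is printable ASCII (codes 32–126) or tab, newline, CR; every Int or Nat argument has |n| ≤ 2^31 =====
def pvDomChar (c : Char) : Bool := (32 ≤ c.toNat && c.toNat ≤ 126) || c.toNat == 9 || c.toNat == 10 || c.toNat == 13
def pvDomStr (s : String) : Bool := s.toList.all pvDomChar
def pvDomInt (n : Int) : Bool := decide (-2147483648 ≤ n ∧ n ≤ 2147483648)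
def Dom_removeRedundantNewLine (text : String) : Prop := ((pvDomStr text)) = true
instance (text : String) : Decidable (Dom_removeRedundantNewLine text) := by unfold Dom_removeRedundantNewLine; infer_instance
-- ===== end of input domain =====

-- B replaces A's output-buffer loop by a stateless pairwise (zip-with-shift) filter; same result, idiomatic.


-- ===== PORT A =====
-- output is the Python string accumulator (as List Char); output[-1] on a nonempty string is getLast?
def removeRedundantNewLine (text : String) : String :=
  String.mk (text.toList.foldl (fun output char =>
    if char = '\n' then
      if output.length > 0 ∧ output.getLast? = some '\n' then output
      else output ++ ['\n']
    else output ++ [char]) [])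

-- ===== PORT B =====
-- text[:1] ++ join of (p,c) in zip(text, text[1:]) kept when c ≠ '\n' or p ≠ '\n'
def removeRedundantNewLine_alt (text : String) : String :=
  match text.toList with
  | [] => ""
  | x :: xs =>
      String.mk (x :: (((x :: xs).zip xs).filter
        (fun pc => pc.2 ≠ '\n' ∨ pc.1 ≠ '\n')).map Prod.snd)

-- ===== PRECONDITION & SPEC =====
def Spec_removeRedundantNewLine (text : String) (out : String) : Prop := out = removeRedundantNewLine_alt text
instance (text : String) (out : String) : Decidable (Spec_removeRedundantNewLine text out) := by unfold Spec_removeRedundantNewLine; infer_instance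

-- ===== CLAIM (what is proved, stated in full; the proofs are below) =====
def Claim_equal_removeRedundantNewLine : Prop := ∀ (text : String), Dom_removeRedundantNewLine text → Spec_removeRedundantNewLine text (removeRedundantNewLine text)

-- ===== LEMMAS AND PROOFS =====

-- common characterisation: collapse prev l drops each '\n' whose predecessor is '\n'
def pvCollapse : Option Char → List Char → List Char
  | _, [] => []
  | prev, c :: rest =>
      if c = '\n' ∧ prev = some '\n' then pvCollapse (some c) rest
      else c :: pvCollapse (some c) rest

lemma foldlA_eq_collapse (l : List Char) (acc : List Char) :
    l.foldl (fun output char =>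
      if char = '\n' then
        if output.length > 0 ∧ output.getLast? = some '\n' then output
        else output ++ ['\n']
      else output ++ [char]) acc = acc ++ pvCollapse acc.getLast? l := by
  induction l generalizing acc with
  | nil => simp [pvCollapse]
  | cons c rest ih =>
    simp only [List.foldl_cons, pvCollapse]
    by_cases hc : c = '\n'
    · subst hc
      by_cases hl : acc.getLast? = some '\n'
      · have hlen : acc.length > 0 := by
          cases acc with
          | nil => simp at hl
          | cons a as => simp
        simp [hl, hlen, ih]
      · simp [hl, ih]
    · simp [hc, ih]

lemma zipFilter_eq_collapse (xs : List Char) (x : Char) :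
    (((x :: xs).zip xs).filter (fun pc => pc.2 ≠ '\n' ∨ pc.1 ≠ '\n')).map Prod.snd
      = pvCollapse (some x) xs := by
  induction xs generalizing x with
  | nil => simp [pvCollapse]
  | cons y ys ih =>
    rw [List.zip_cons_cons, List.filter_cons]
    by_cases h : y = '\n' ∧ x = '\n'
    · rw [if_neg (by simp [h.1, h.2])]
      rw [ih y]
      simp [pvCollapse, h.1, h.2]
    · have hd : (y ≠ '\n' ∨ x ≠ '\n') := by tauto
      rw [if_pos (by simpa using hd)]
      rw [List.map_cons, ih y]
      simp only [pvCollapse, Option.some.injEq]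
      rw [if_neg h]

-- ===== VERDICT (by name: the statement is the Claim_ definition above) =====
theorem removeRedundantNewLine_spec : Claim_equal_removeRedundantNewLine := by
  intro text _
  unfold Spec_removeRedundantNewLine removeRedundantNewLine removeRedundantNewLine_alt
  rw [foldlA_eq_collapse]
  cases h : text.toList with
  | nil => rfl
  | cons x xs =>
    simp only [List.nil_append, List.getLast?_nil]
    rw [zipFilter_eq_collapse]
    simp [pvCollapse]
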